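-- pv_equiv track=rewrite | github.com/msmenegol/LNC-Challege | importData.py | findWith
-- ===== SOURCE A (Python) =====
-- def findWith(d,val,n):
--     indexes = []
--     for i in range(len(d)):
--         for j in range(len(d[i])):
--             if val in str(d[i][j]):
--                 indexes.append(i)
--                 break
--         if len(indexes)>n:
--             return indexes
-- ===== SOURCE B (Python) =====
-- def findWith(d, val, n):
--     # collect all matching row indices in one pass, then decide the threshold once
--     matches = [i for i, row in enumerate(d) if any(val in str(c) for c in row)]
--     if len(matches) > n:
--         return matches[:max(n + 1, 0)]
-- ===== Notes on version B (the rewrite author's own statement) =====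
-- stated objective: simpler
-- what changed: B builds the full list of matching row indices in one comprehension and makes the threshold/slice decision once at the end, instead of A's interleaved append-and-early-return scan with an inner indexed break loop.
-- intended difference: For negative n with d empty or with the first row containing val, A's post-row threshold check fires right after row 0 and returns None (empty d) or the stray prefix [0]; B returns [], the first max(n+1,0)=0 matches, which is the intended 'more than n matches, return the first n+1' answer. — e.g. on findWith([["a"]], "a", -1): A returns some [0], B returns some []
import Mathlib
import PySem

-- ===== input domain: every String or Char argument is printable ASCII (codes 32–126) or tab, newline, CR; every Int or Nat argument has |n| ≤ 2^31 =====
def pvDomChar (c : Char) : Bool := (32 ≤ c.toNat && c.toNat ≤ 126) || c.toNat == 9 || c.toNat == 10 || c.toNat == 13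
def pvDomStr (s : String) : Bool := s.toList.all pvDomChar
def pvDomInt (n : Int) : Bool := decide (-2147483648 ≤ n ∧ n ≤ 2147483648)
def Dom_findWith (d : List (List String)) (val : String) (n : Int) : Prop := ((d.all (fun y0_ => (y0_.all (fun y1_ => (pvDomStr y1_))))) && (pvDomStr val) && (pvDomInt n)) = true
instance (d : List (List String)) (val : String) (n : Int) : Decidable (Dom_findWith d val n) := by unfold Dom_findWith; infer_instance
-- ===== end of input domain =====

-- B separates collection from the threshold decision: one comprehension builds all matching
-- row indices, then a single final check slices off the first n+1 (objective: simpler).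

-- ===== PORT A =====
-- inner loop 'for j in range(len(d[i])): if val in str(d[i][j]): indexes.append(i); break'
def pvRowHit (val : String) : List String → Bool
  | [] => false
  | c :: cs => if PySem.Str.isIn val c then true else pvRowHit val cs

-- outer loop 'for i in range(len(d))' with the append and the post-row early return
def findWithGo (val : String) (n : Int) (indexes : List Int) (i : Int) : List (List String) → Option (List Int)
  | [] => none
  | row :: rest =>
    let indexes' := if pvRowHit val row then indexes ++ [i] else indexes
    if n < (indexes'.length : Int) then some indexes'
    else findWithGo val n indexes' (i + 1) rest

def findWith (d : List (List String)) (val : String) (n : Int) : Option (List Int) :=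
  findWithGo val n [] 0 d

-- ===== PORT B =====
def findWith_alt (d : List (List String)) (val : String) (n : Int) : Option (List Int) :=
  let hits : List Int :=
    ((PySem.List.enumerate d).filter (fun p => p.2.any (fun c => PySem.Str.isIn val c))).map (fun p => p.1)
  if n < (hits.length : Int) then some (hits.take (max (n + 1) 0).toNat) else none

-- ===== PRECONDITION & SPEC =====
-- For negative n, A's post-row threshold check fires right after row 0, so A returns None on empty d
-- and the stray prefix [0] when the first row contains val; B uniformly returns [] — the first
-- max(n+1,0) = 0 of the matches, the intended "more than n matches, give the first n+1" answer.
def D_findWith (d : List (List String)) (val : String) (n : Int) : Prop :=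
  n < 0 ∧ (d = [] ∨ (d.headD []).any (fun c => PySem.Str.isIn val c) = true)
instance (d : List (List String)) (val : String) (n : Int) : Decidable (D_findWith d val n) := by unfold D_findWith; infer_instance

def Spec_findWith (d : List (List String)) (val : String) (n : Int) (out : Option (List Int)) : Prop := ¬ D_findWith d val n → out = findWith_alt d val n
instance (d : List (List String)) (val : String) (n : Int) (out : Option (List Int)) : Decidable (Spec_findWith d val n out) := by unfold Spec_findWith; infer_instance

def pvDiffWitness_findWith : List (List String) × String × Int := ([["a"]], "a", -1)
def pvDiffWitnessOut_findWith : (Option (List Int)) × (Option (List Int)) := (some [0], some [])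

-- ===== CLAIM (what is proved, stated in full; the proofs are below) =====
def Claim_unchanged_findWith : Prop := ∀ (d : List (List String)) (val : String) (n : Int), Dom_findWith d val n → Spec_findWith d val n (findWith d val n)
def Claim_changed_findWith : Prop := Dom_findWith (pvDiffWitness_findWith.1) (pvDiffWitness_findWith.2.1) (pvDiffWitness_findWith.2.2) ∧ D_findWith (pvDiffWitness_findWith.1) (pvDiffWitness_findWith.2.1) (pvDiffWitness_findWith.2.2) ∧ findWith (pvDiffWitness_findWith.1) (pvDiffWitness_findWith.2.1) (pvDiffWitness_findWith.2.2) = pvDiffWitnessOut_findWith.1 ∧ findWith_alt (pvDiffWitness_findWith.1) (pvDiffWitness_findWith.2.1) (pvDiffWitness_findWith.2.2) = pvDiffWitnessOut_findWith.2 ∧ pvDiffWitnessOut_findWith.1 ≠ pvDiffWitnessOut_findWith.2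
def Claim_exact_findWith : Prop := ∀ (d : List (List String)) (val : String) (n : Int), Dom_findWith d val n → D_findWith d val n → findWith d val n ≠ findWith_alt d val n

-- ===== LEMMAS AND PROOFS =====

-- row indices (counting from i) of the rows of d that contain val
def pvMatchesFrom (val : String) (i : Int) : List (List String) → List Int
  | [] => []
  | row :: rest =>
    if pvRowHit val row then i :: pvMatchesFrom val (i + 1) rest else pvMatchesFrom val (i + 1) rest

theorem pvRowHit_eq_any (val : String) (row : List String) :
    pvRowHit val row = row.any (fun c => PySem.Str.isIn val c) := by
  induction row with
  | nil => rfl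
  | cons c cs ih => simp [pvRowHit, ih]

-- B's comprehension computes pvMatchesFrom
theorem pvMatches_eq (val : String) (d : List (List String)) : ∀ i : Int,
    ((PySem.List.enumerate d i).filter (fun p => p.2.any (fun c => PySem.Str.isIn val c))).map (fun p => p.1)
      = pvMatchesFrom val i d := by
  induction d with
  | nil => intro i; rfl
  | cons row rest ih =>
    intro i
    rw [PySem.List.enumerate_cons, List.filter_cons]
    simp only [pvMatchesFrom, pvRowHit_eq_any]
    split <;> rename_i hc <;> simp_all

-- A's loop invariant: with at most n indices collected so far, the loop returns the
-- accumulated list extended to n+1 matches if the total ever exceeds n, else None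
theorem findWithGo_spec (val : String) (n : Int) (d : List (List String)) :
    ∀ (acc : List Int) (i : Int), (acc.length : Int) ≤ n →
    findWithGo val n acc i d =
      if n < (acc.length : Int) + ((pvMatchesFrom val i d).length : Int)
      then some ((acc ++ pvMatchesFrom val i d).take (n + 1).toNat)
      else none := by
  induction d with
  | nil =>
    intro acc i hle
    simp [findWithGo, pvMatchesFrom]
    omega
  | cons row rest ih =>
    intro acc i hle
    by_cases h : pvRowHit val row = true
    · simp only [findWithGo, h, if_true, pvMatchesFrom]
      by_cases h2 : n < (((acc ++ [i]).length : Nat) : Int)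
      · rw [if_pos h2]
        have hn : n = (acc.length : Int) := by simp at h2; omega
        have hpos : n < (acc.length : Int) + (((i :: pvMatchesFrom val (i+1) rest)).length : Int) := by
          simp; omega
        rw [if_pos hpos]
        have htake : (n + 1).toNat = (acc ++ [i]).length := by simp; omega
        have he : acc ++ i :: pvMatchesFrom val (i+1) rest = (acc ++ [i]) ++ pvMatchesFrom val (i+1) rest := by simp
        rw [he, htake, List.take_left]
      · rw [if_neg h2]
        have hle' : (((acc ++ [i]).length : Nat) : Int) ≤ n := by simp at h2 ⊢; omega
        rw [ih (acc ++ [i]) (i+1) hle']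
        have he : (acc ++ [i]) ++ pvMatchesFrom val (i+1) rest = acc ++ i :: pvMatchesFrom val (i+1) rest := by simp
        rw [he]
        congr 2
        simp; omega
    · have h' : pvRowHit val row = false := by simpa using h
      simp only [findWithGo, h', Bool.false_eq_true, if_false]
      rw [if_neg (by omega : ¬ n < ((acc.length : Nat) : Int))]
      rw [ih acc (i+1) hle]
      simp [pvMatchesFrom, h']

theorem pv_main : ∀ (d : List (List String)) (val : String) (n : Int), ¬ D_findWith d val n → findWith d val n = findWith_alt d val n := by
  intro d val n hD
  unfold findWith findWith_alt
  simp only [pvMatches_eq]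
  by_cases hn : 0 ≤ n
  · rw [findWithGo_spec val n d [] 0 (by simpa using hn)]
    simp only [List.length_nil, List.nil_append, Nat.cast_zero, zero_add]
    have hm : max (n + 1) 0 = n + 1 := by omega
    rw [hm]
  · unfold D_findWith at hD
    push Not at hD
    obtain ⟨hne, hrow0⟩ := hD (by omega)
    obtain ⟨row, rest, rfl⟩ := List.exists_cons_of_ne_nil hne
    have hrow : row.any (fun c => PySem.Str.isIn val c) = false := by simpa using hrow0
    have hhit : pvRowHit val row = false := by rw [pvRowHit_eq_any, hrow]
    simp only [findWithGo, hhit, Bool.false_eq_true, if_false]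
    rw [if_pos (by simp; omega : n < ((([] : List Int)).length : Int))]
    rw [if_pos (by omega : n < ((pvMatchesFrom val 0 (row :: rest)).length : Int))]
    have hm : max (n + 1) 0 = 0 := by omega
    simp [hm]

theorem pv_tight : ∀ (d : List (List String)) (val : String) (n : Int), D_findWith d val n → findWith d val n ≠ findWith_alt d val n := by
  intro d val n hD
  obtain ⟨hn, hcase⟩ := hD
  have hB : findWith_alt d val n = some [] := by
    unfold findWith_alt
    simp only [pvMatches_eq]
    rw [if_pos (by omega : n < ((pvMatchesFrom val 0 d).length : Int))]
    have hm : max (n + 1) 0 = 0 := by omega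
    simp [hm]
  rw [hB]
  cases d with
  | nil => unfold findWith findWithGo; simp
  | cons row rest =>
    have hrow : row.any (fun c => PySem.Str.isIn val c) = true := by
      rcases hcase with h | h
      · exact absurd h (by simp)
      · simpa using h
    have hhit : pvRowHit val row = true := by rw [pvRowHit_eq_any, hrow]
    unfold findWith
    simp only [findWithGo, hhit, if_true]
    rw [if_pos (by simp; omega : n < ((([] : List Int) ++ [(0:Int)]).length : Int))]
    simp

-- ===== VERDICT (by name: the statement is the Claim_ definition above) =====
theorem findWith_spec : Claim_unchanged_findWith := by
  intro d val n _dom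
  unfold Spec_findWith
  intro hD
  exact pv_main d val n hD

theorem findWith_changed : Claim_changed_findWith := by
  unfold Claim_changed_findWith; decide

theorem findWith_tight : Claim_exact_findWith := by
  intro d val n _dom hD
  exact pv_tight d val n hD
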